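-- pv_equiv track=rewrite | github.com/rosejae/pjt_sequence | ic_one2many/src/caption_preprocessing.py | textfile_preprocessing
-- ===== SOURCE A (Python) =====
-- def textfile_preprocessing(doc):
--     descriptions = dict()
--     for line in doc.split('\n'):
--         tokens = line.split()
--         if len(line) > 2:
--             image_id = tokens[0].split('.')[0]
--             image_desc = ' '.join(tokens[1:])
--             if image_id not in descriptions:
--                 descriptions[image_id] = list()
--             descriptions[image_id].append(image_desc)
--
--     ### vocabulary (set) ###
--     def dict_to_vocab(descriptions):
--         vocabulary = set()
--         for key in descriptions.keys():
--             [vocabulary.update(d.split()) for d in descriptions[key]]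
--         return vocabulary
--
--     ### new_descriptions (string) ###
--     def dict_to_list(descriptions):
--         lines = list()
--         for key, desc_list in descriptions.items():
--             for desc in desc_list:
--                 lines.append(key + ' ' + desc)
--         new_descriptions = '\n'.join(lines)
--         return new_descriptions
--
--     vocabulary = dict_to_vocab(descriptions)
--     new_descriptions = dict_to_list(descriptions)
--     return descriptions, vocabulary, new_descriptions
-- ===== SOURCE B (Python) =====
-- def textfile_preprocessing(doc):
--     # Parse into a flat (image_id, image_desc) pair list in line order.
--     pairs = []
--     for line in doc.split('\n'):
--         if len(line) > 2:
--             tokens = line.split()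
--             pairs.append((tokens[0].split('.')[0], ' '.join(tokens[1:])))
--     # First-occurrence key order, then group by filtering the pair list per key.
--     keys = []
--     for k, _ in pairs:
--         if k not in keys:
--             keys.append(k)
--     descriptions = {k: [d for k2, d in pairs if k2 == k] for k in keys}
--     vocabulary = set(w for k in keys for d in descriptions[k] for w in d.split())
--     new_descriptions = '\n'.join(k + ' ' + d for k in keys for d in descriptions[k])
--     return descriptions, vocabulary, new_descriptions
-- ===== Notes on version B (the rewrite author's own statement) =====
-- stated objective: alternative
-- what changed: B never builds the dict while parsing: it collects a flat (image_id, desc) pair list, derives the first-occurrence key order with an explicit list, and groups by filtering the pair list per key (a nested-scan group-by), building descriptions as a dict comprehension and vocabulary/new_descriptions by flat generators over that grouping, instead of A's incremental dict with membership-test-then-append plus two nested helper-function loops.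
import Mathlib
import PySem

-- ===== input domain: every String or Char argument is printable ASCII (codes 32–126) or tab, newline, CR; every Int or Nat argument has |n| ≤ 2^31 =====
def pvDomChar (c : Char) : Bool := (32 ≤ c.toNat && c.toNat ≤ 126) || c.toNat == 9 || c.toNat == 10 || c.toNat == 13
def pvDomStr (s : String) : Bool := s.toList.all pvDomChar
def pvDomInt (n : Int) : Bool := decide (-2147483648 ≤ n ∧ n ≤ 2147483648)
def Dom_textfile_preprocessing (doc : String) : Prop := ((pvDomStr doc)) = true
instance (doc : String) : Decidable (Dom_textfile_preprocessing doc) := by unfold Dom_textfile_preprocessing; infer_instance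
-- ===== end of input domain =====

-- B replaces A's incremental dict-while-parsing and its two nested helper-function loops
-- by a flat (image_id, desc) pair list, an explicit first-occurrence key list and a
-- per-key filter group-by; objective: alternative (same results, different algorithm).

-- ===== PORT A =====
-- loop body of A's parse loop
def pvStepA (d : PySem.Dict String (List String)) (line : String) : PySem.Dict String (List String) :=
  let tokens := PySem.Str.split₀ line
  if 2 < PySem.Str.len line then
    match tokens with
    | [] => d    -- tokens[0] raises IndexError in Python; excluded by Pre_
    | t0 :: rest =>
      let image_id := ((PySem.Str.split? t0 ".").getD []).headD ""   -- split('.') is never empty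
      let image_desc := PySem.Str.join " " rest
      let d' := if d.contains image_id then d else d.insert image_id []
      d'.modify image_id [] (· ++ [image_desc])
  else d

def textfile_preprocessing (doc : String) : (List (String × List String)) × List String × String :=
  let descriptions := ((PySem.Str.split? doc "\n").getD []).foldl pvStepA PySem.Dict.empty
  -- dict_to_vocab
  let vocabulary := descriptions.keys.foldl
    (fun v key => (descriptions.getD key []).foldl
      (fun v d => PySem.Set.update v (PySem.Str.split₀ d)) v) PySem.Set.empty
  -- dict_to_list
  let lines := descriptions.items.foldl
    (fun ls kv => kv.2.foldl (fun ls desc => ls ++ [kv.1 ++ " " ++ desc]) ls) []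
  (descriptions.items, vocabulary, PySem.Str.join "\n" lines)

-- ===== PORT B =====
def textfile_preprocessing_alt (doc : String) : (List (String × List String)) × List String × String :=
  -- flat (image_id, image_desc) pair list, in line order
  let pairs := ((PySem.Str.split? doc "\n").getD []).foldl (fun ps line =>
    if 2 < PySem.Str.len line then
      match PySem.Str.split₀ line with
      | [] => ps    -- tokens[0] raises IndexError in Python; excluded by Pre_
      | t0 :: rest =>
        ps ++ [(((PySem.Str.split? t0 ".").getD []).headD "", PySem.Str.join " " rest)]
    else ps) []
  -- first-occurrence key order
  let keys := pairs.foldl (fun ks p => if ks.contains p.1 then ks else ks ++ [p.1]) []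
  -- group-by as a dict comprehension: per-key filter of the pair list
  let descriptions := keys.foldl
    (fun dd k => dd.insert k ((pairs.filter (fun p => p.1 == k)).map (·.2))) PySem.Dict.empty
  let vocabulary := PySem.Set.ofList
    (keys.flatMap (fun k => (descriptions.getD k []).flatMap PySem.Str.split₀))
  let new_descriptions := PySem.Str.join "\n"
    (keys.flatMap (fun k => (descriptions.getD k []).map (fun d => k ++ " " ++ d)))
  (descriptions.items, vocabulary, new_descriptions)

-- ===== PRECONDITION & SPEC =====
-- Pre_ excludes docs containing a whitespace-only line longer than 2 characters: there
-- len(line) > 2 passes but line.split() is empty, so both A and B raise IndexError on tokens[0].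
def Pre_textfile_preprocessing (doc : String) : Prop :=
  ∀ line ∈ (PySem.Str.split? doc "\n").getD [], 2 < PySem.Str.len line → PySem.Str.split₀ line ≠ []
instance (doc : String) : Decidable (Pre_textfile_preprocessing doc) := by
  unfold Pre_textfile_preprocessing; infer_instance

def pvWitness_textfile_preprocessing : String := "a.jpg x y\nb.jpg z\na.jpg w"

def Spec_textfile_preprocessing (doc : String) (out : (List (String × List String)) × List String × String) : Prop := out = textfile_preprocessing_alt doc
instance (doc : String) (out : (List (String × List String)) × List String × String) : Decidable (Spec_textfile_preprocessing doc out) := by unfold Spec_textfile_preprocessing; infer_instance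

-- ===== CLAIM (what is proved, stated in full; the proofs are below) =====
def Claim_equal_textfile_preprocessing : Prop := ∀ (doc : String), Dom_textfile_preprocessing doc → Pre_textfile_preprocessing doc → Spec_textfile_preprocessing doc (textfile_preprocessing doc)

-- ===== LEMMAS AND PROOFS =====

-- the parsed fields of one accepted line
def pvKey (l : String) : String :=
  ((PySem.Str.split? ((PySem.Str.split₀ l).headD "") ".").getD []).headD ""
def pvDesc (l : String) : String := PySem.Str.join " " (PySem.Str.split₀ l).tail
-- the flat pair list both programs effectively parse out of doc
def pvPairs (doc : String) : List (String × String) :=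
  ((((PySem.Str.split? doc "\n").getD []).filter
    (fun l => decide (2 < PySem.Str.len l))).map (fun l => (pvKey l, pvDesc l)))

-- membership-test-then-insert-then-append equals one modify
lemma pvStep_modify (d : PySem.Dict String (List String)) (k : String) (v : String) :
    (if d.contains k then d else d.insert k []).modify k [] (· ++ [v])
      = d.modify k [] (· ++ [v]) := by
  by_cases hc : d.contains k = true
  · rw [if_pos hc]
  · simp only [Bool.not_eq_true] at hc
    rw [if_neg (by simp [hc])]
    unfold PySem.Dict.modify
    rw [PySem.Dict.getD_insert_self, PySem.Dict.insert_insert_self,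
      PySem.Dict.getD_of_not_contains d [] hc]

-- A's parse loop is the modify-fold over the flat pair list
lemma pvA_dict_eq (doc : String) (h : Pre_textfile_preprocessing doc) :
    ((PySem.Str.split? doc "\n").getD []).foldl pvStepA PySem.Dict.empty
      = (pvPairs doc).foldl (fun d p => d.modify p.1 [] (· ++ [p.2])) PySem.Dict.empty := by
  unfold pvPairs
  rw [List.foldl_map, ← PySem.List.foldl_ite_eq_foldl_filter
    (p := fun l => 2 < PySem.Str.len l)]
  apply PySem.List.foldl_congr_mem
  intro acc l hl
  unfold pvStepA pvKey pvDesc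
  by_cases hlen : 2 < PySem.Str.len l
  · rw [if_pos hlen, if_pos hlen]
    cases hsp : PySem.Str.split₀ l with
    | nil => exact absurd hsp (h l hl hlen)
    | cons t0 rest => simp only [List.headD_cons, List.tail_cons]; exact pvStep_modify ..
  · rw [if_neg hlen, if_neg hlen]

-- B's parse loop builds exactly that pair list
lemma pvB_pairs_eq (doc : String) (h : Pre_textfile_preprocessing doc) :
    ((PySem.Str.split? doc "\n").getD []).foldl (fun ps line =>
      if 2 < PySem.Str.len line then
        match PySem.Str.split₀ line with
        | [] => ps
        | t0 :: rest =>
          ps ++ [(((PySem.Str.split? t0 ".").getD []).headD "", PySem.Str.join " " rest)]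
      else ps) []
      = pvPairs doc := by
  unfold pvPairs
  have hcongr := PySem.List.foldl_congr_mem (l := (PySem.Str.split? doc "\n").getD [])
    (init := ([] : List (String × String)))
    (g := fun ps l => if 2 < PySem.Str.len l then ps ++ [(pvKey l, pvDesc l)] else ps)
    (f := fun ps line =>
      if 2 < PySem.Str.len line then
        match PySem.Str.split₀ line with
        | [] => ps
        | t0 :: rest =>
          ps ++ [(((PySem.Str.split? t0 ".").getD []).headD "", PySem.Str.join " " rest)]
      else ps) ?_
  · rw [hcongr, PySem.List.foldl_append_ite (p := fun l => 2 < PySem.Str.len l)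
      (f := fun l => (pvKey l, pvDesc l)), List.nil_append]
  intro acc l hl
  dsimp only
  by_cases hlen : 2 < PySem.Str.len l
  · rw [if_pos hlen, if_pos hlen]
    cases hsp : PySem.Str.split₀ l with
    | nil => exact absurd hsp (h l hl hlen)
    | cons t0 rest => unfold pvKey pvDesc; simp [hsp]
  · rw [if_neg hlen, if_neg hlen]

-- B's key loop is ordered dedup of the pair keys
lemma pvB_keys_eq (P : List (String × String)) :
    P.foldl (fun ks p => if ks.contains p.1 then ks else ks ++ [p.1]) []
      = PySem.Set.ofList (P.map Prod.fst) := by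
  rw [PySem.Set.ofList_eq_foldl, List.foldl_map]
  rfl

-- a loop 'for x in l: v.update(g(x))' is one update by the concatenation
lemma pvFoldlUpdate {α : Type} (g : α → List String) (l : List α) (v : PySem.Set String) :
    l.foldl (fun v x => PySem.Set.update v (g x)) v = PySem.Set.update v (l.flatMap g) := by
  induction l generalizing v with
  | nil => simp [PySem.Set.update]
  | cons x xs ih => rw [List.foldl_cons, ih, List.flatMap_cons, PySem.Set.update_append]

-- ===== VERDICT (by name: the statement is the Claim_ definition above) =====
theorem textfile_preprocessing_spec : Claim_equal_textfile_preprocessing := by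
  intro doc _ hpre
  unfold Spec_textfile_preprocessing textfile_preprocessing textfile_preprocessing_alt
  dsimp only
  rw [pvA_dict_eq doc hpre, pvB_pairs_eq doc hpre]
  set P := pvPairs doc with hP
  set d := P.foldl (fun d p => d.modify p.1 [] (· ++ [p.2])) PySem.Dict.empty with hd
  have hnd : d.keys.Nodup := by
    rw [hd]
    exact PySem.Dict.nodup_keys_foldl_modify_key P Prod.fst [] _ _ PySem.Dict.nodup_keys_empty
  have hkeys : d.keys = PySem.Set.ofList (P.map Prod.fst) := by
    rw [hd, PySem.Dict.keys_foldl_modify_key]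
    simp [PySem.Set.update, PySem.Set.ofList_eq_foldl]
  have hgetD : ∀ k, d.getD k [] = (P.filter (fun p => p.1 == k)).map (·.2) := by
    intro k
    rw [hd, PySem.Dict.getD_foldl_modify_append, PySem.Dict.getD_empty]
    simp
  -- B's grouped dict equals A's dict
  rw [pvB_keys_eq P, ← hkeys]
  have hdescB : d.keys.foldl
      (fun dd k => dd.insert k ((P.filter (fun p => p.1 == k)).map (·.2))) PySem.Dict.empty = d := by
    apply PySem.Dict.ext
    rw [PySem.Dict.items_foldl_insert_fresh d.keys (fun x => x)
      (fun k => (P.filter (fun p => p.1 == k)).map (·.2)) PySem.Dict.empty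
      (fun a _ => PySem.Dict.contains_empty a) (by simpa using hnd)]
    rw [PySem.Dict.items_eq_map_keys d hnd []]
    show ((PySem.Dict.empty : PySem.Dict String (List String)).items) ++ _ = _
    rw [show (PySem.Dict.empty : PySem.Dict String (List String)).items = [] from rfl,
      List.nil_append]
    exact (List.map_congr_left (fun k _ => by rw [hgetD k])).symm
  rw [hdescB]
  refine Prod.ext rfl (Prod.ext ?_ ?_)
  · -- vocabulary
    show d.keys.foldl _ PySem.Set.empty = PySem.Set.ofList _
    have : ∀ v : PySem.Set String, d.keys.foldl
        (fun v key => (d.getD key []).foldl (fun v s => PySem.Set.update v (PySem.Str.split₀ s)) v) v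
        = PySem.Set.update v
            (d.keys.flatMap (fun k => (d.getD k []).flatMap (fun desc => PySem.Str.split₀ desc))) := by
      intro v
      rw [← pvFoldlUpdate (fun k => (d.getD k []).flatMap (fun desc => PySem.Str.split₀ desc))]
      exact PySem.List.foldl_congr_mem _ _ _ _ (fun acc k _ => pvFoldlUpdate _ _ _)
    rw [this PySem.Set.empty]
    exact PySem.Set.update_nil_left _
  · -- new_descriptions
    show PySem.Str.join "\n" (d.items.foldl _ []) = PySem.Str.join "\n" _
    congr 1
    have : ∀ acc, d.items.foldl
        (fun ls kv => kv.2.foldl (fun ls desc => ls ++ [kv.1 ++ " " ++ desc]) ls) acc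
        = acc ++ d.items.flatMap (fun kv => kv.2.map (fun desc => kv.1 ++ " " ++ desc)) := by
      intro acc
      rw [← PySem.List.foldl_append_eq_flatMap]
      exact PySem.List.foldl_congr_mem _ _ _ _
        (fun acc kv _ => PySem.List.foldl_append_singleton_eq_map _ _ _)
    rw [this [], List.nil_append, PySem.Dict.items_eq_map_keys d hnd [], List.flatMap_map]
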